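-- pv_equiv track=rewrite | github.com/WhatcomCoders2023/churchHistoryKG-Python | preprocessing/preprocessing_utils.py | separate_parentheses
-- ===== SOURCE A (Python) =====
-- def separate_parentheses(input_list):
--     output = []
--     for word in input_list:
--
--         if word and word[0] == '(' and word[-1] == ')':
--             output.append('(')
--             output.append(word[1:len(word) - 1])
--             output.append(')')
--         elif word and word[0] == '(':
--             output.append('(')
--             output.append(word[1:])
--         elif word and word[-1] == ')':
--             output.append(word[0:len(word) - 1])
--             output.append(')')
--         else:
--             output.append(word)
--     return output
-- ===== SOURCE B (Python) =====
-- def _split_open(w):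
--     return ['(', w[1:]] if w and w[0] == '(' else [w]
--
--
-- def _split_close(t):
--     return [t[:-1], ')'] if t and t[-1] == ')' else [t]
--
--
-- def separate_parentheses(input_list):
--     opened = [p for w in input_list for p in _split_open(w)]
--     return [p for t in opened for p in _split_close(t)]
-- ===== Notes on version B (the rewrite author's own statement) =====
-- stated objective: alternative
-- what changed: Replaces A's single pass with a four-way if/elif per word by two staged passes over the whole list: the first pass only detaches a leading '(', producing an intermediate token list, and the second pass only detaches a trailing ')' from each intermediate token.
import Mathlib
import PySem

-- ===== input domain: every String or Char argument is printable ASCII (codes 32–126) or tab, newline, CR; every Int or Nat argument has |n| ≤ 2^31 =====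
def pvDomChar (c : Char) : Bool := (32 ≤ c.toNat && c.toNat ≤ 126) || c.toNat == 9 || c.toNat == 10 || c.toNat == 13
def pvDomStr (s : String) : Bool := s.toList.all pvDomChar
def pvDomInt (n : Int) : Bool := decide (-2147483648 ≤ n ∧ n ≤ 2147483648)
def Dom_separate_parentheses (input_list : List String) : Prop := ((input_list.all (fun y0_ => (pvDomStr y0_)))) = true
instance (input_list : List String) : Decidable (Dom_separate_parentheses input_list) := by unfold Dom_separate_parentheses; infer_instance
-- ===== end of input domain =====

-- B replaces A's single pass with its four-way if/elif by two staged passes over the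
-- list: one detaching leading '(', a second detaching trailing ')' (alternative).

-- ===== PORT A =====
def separate_parentheses (input_list : List String) : List String :=
  input_list.foldl (fun output word =>
    let cs := word.toList
    if cs ≠ [] ∧ PySem.List.pyGet? cs 0 = some '(' ∧ PySem.List.pyGet? cs (-1) = some ')' then
      ((output ++ ["("]) ++
        [String.ofList (PySem.List.slice cs (some 1) (some ((cs.length : Int) - 1)))]) ++ [")"]
    else if cs ≠ [] ∧ PySem.List.pyGet? cs 0 = some '(' then
      (output ++ ["("]) ++ [String.ofList (PySem.List.slice cs (some 1) none)]
    else if cs ≠ [] ∧ PySem.List.pyGet? cs (-1) = some ')' then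
      (output ++
        [String.ofList (PySem.List.slice cs (some 0) (some ((cs.length : Int) - 1)))]) ++ [")"]
    else
      output ++ [word]) []

-- ===== PORT B =====
def pvSplitOpen (w : String) : List String :=
  let cs := w.toList
  if cs ≠ [] ∧ PySem.List.pyGet? cs 0 = some '(' then
    ["(", String.ofList (PySem.List.slice cs (some 1) none)]
  else [w]

def pvSplitClose (t : String) : List String :=
  let cs := t.toList
  if cs ≠ [] ∧ PySem.List.pyGet? cs (-1) = some ')' then
    [String.ofList (PySem.List.slice cs none (some (-1))), ")"]
  else [t]

def separate_parentheses_alt (input_list : List String) : List String :=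
  (input_list.flatMap pvSplitOpen).flatMap pvSplitClose

-- ===== PRECONDITION & SPEC =====
def Spec_separate_parentheses (input_list : List String) (out : List String) : Prop := out = separate_parentheses_alt input_list
instance (input_list : List String) (out : List String) : Decidable (Spec_separate_parentheses input_list out) := by unfold Spec_separate_parentheses; infer_instance

-- ===== CLAIM =====
def Claim_equal_separate_parentheses : Prop := ∀ (input_list : List String), Dom_separate_parentheses input_list → Spec_separate_parentheses input_list (separate_parentheses input_list)

-- ===== LEMMAS AND PROOFS =====

-- A's per-word branch result equals B's two-stage pieces for that word.
theorem pvStep_eq (output : List String) (word : String) :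
    (let cs := word.toList
     if cs ≠ [] ∧ PySem.List.pyGet? cs 0 = some '(' ∧ PySem.List.pyGet? cs (-1) = some ')' then
       ((output ++ ["("]) ++
         [String.ofList (PySem.List.slice cs (some 1) (some ((cs.length : Int) - 1)))]) ++ [")"]
     else if cs ≠ [] ∧ PySem.List.pyGet? cs 0 = some '(' then
       (output ++ ["("]) ++ [String.ofList (PySem.List.slice cs (some 1) none)]
     else if cs ≠ [] ∧ PySem.List.pyGet? cs (-1) = some ')' then
       (output ++
         [String.ofList (PySem.List.slice cs (some 0) (some ((cs.length : Int) - 1)))]) ++ [")"]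
     else
       output ++ [word]) = output ++ (pvSplitOpen word).flatMap pvSplitClose := by
  show _ = _
  unfold pvSplitOpen pvSplitClose
  cases hcs : word.toList with
  | nil =>
      have hw : word = "" := String.toList_eq_nil_iff.mp hcs
      subst hw; simp
  | cons c rest =>
    have hparen : ¬ PySem.List.pyGet? ['('] (-1) = some ')' := by decide
    by_cases hpre : c = '('
    · subst hpre
      rcases List.eq_nil_or_concat rest with rfl | ⟨ds, d, rfl⟩
      · -- word is "(" alone: A takes branch 2, B's close pass leaves both pieces alone
        simp [hparen, PySem.List.slice_from_one]
      · by_cases hd : d = ')'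
        · subst hd
          have hpost : PySem.List.pyGet? ('(' :: (ds ++ [')'])) (-1) = some ')' :=
            PySem.List.pyGet?_neg_one_append_singleton ('(' :: ds) ')'
          have hrest : PySem.List.pyGet? (ds ++ [')']) (-1) = some ')' :=
            PySem.List.pyGet?_neg_one_append_singleton _ _
          have hslice : PySem.List.slice ('(' :: (ds ++ [')'])) (some 1)
              (some ((ds.length : Int) + 1)) = ds := by
            rw [PySem.List.slice_toNat _ (by omega) (by omega)]
            simp
          simp [hpost, hrest, hparen, hslice, PySem.List.slice_from_one,
            PySem.List.slice_to_neg_one]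
        · have hpost : ¬ PySem.List.pyGet? ('(' :: (ds ++ [d])) (-1) = some ')' := by
            have h2 : PySem.List.pyGet? ('(' :: (ds ++ [d])) (-1) = some d :=
              PySem.List.pyGet?_neg_one_append_singleton ('(' :: ds) d
            simp [h2, hd]
          have hrest : ¬ PySem.List.pyGet? (ds ++ [d]) (-1) = some ')' := by
            simp [PySem.List.pyGet?_neg_one_append_singleton, hd]
          simp [hpost, hd, hparen, PySem.List.slice_from_one]
    · have hw : ¬ word = "" := by intro h; rw [h] at hcs; simp at hcs
      by_cases hpost : PySem.List.pyGet? (c :: rest) (-1) = some ')'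
      · have hwlen : word.length = rest.length + 1 := by
          have h2 := congrArg List.length hcs
          simpa using h2
        simp [hcs, hpre, hpost, hw, hwlen, PySem.List.slice_to_neg_one,
          List.dropLast_eq_take]
      · simp [hcs, hpre, hpost, hw]

theorem pvFold_eq (input_list : List String) :
    separate_parentheses input_list = separate_parentheses_alt input_list := by
  unfold separate_parentheses separate_parentheses_alt
  induction input_list using List.reverseRecOn with
  | nil => rfl
  | append_singleton xs x ih =>
      rw [List.foldl_append, List.flatMap_append, List.flatMap_append, ← ih]
      simpa using pvStep_eq _ x

-- ===== VERDICT =====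
theorem separate_parentheses_spec : Claim_equal_separate_parentheses := by
  intro input_list _
  exact pvFold_eq input_list
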